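-- pv_equiv track=rewrite | github.com/rumguruxmolly/elpython | proj.py | biverif
-- ===== SOURCE A (Python) =====
-- def biverif(x):
--     ch = str(x)
--     test = True
--     i = 0
--     while test and i < len(ch):
--         test = ch[i] == "0" or ch[i] == "1"
--         i += 1
--     return test
-- ===== SOURCE B (Python) =====
-- def biverif(x):
--     if x < 0:
--         return False
--     while True:
--         x, d = divmod(x, 10)
--         if d > 1:
--             return False
--         if x == 0:
--             return True
-- ===== Notes on version B (the rewrite author's own statement) =====
-- stated objective: alternative
-- what changed: B never builds str(x): it rejects negatives directly and then extracts decimal digits arithmetically with divmod, checking that every extracted digit is zero or one, instead of A's character-by-character scan of the string representation.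
import Mathlib
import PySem

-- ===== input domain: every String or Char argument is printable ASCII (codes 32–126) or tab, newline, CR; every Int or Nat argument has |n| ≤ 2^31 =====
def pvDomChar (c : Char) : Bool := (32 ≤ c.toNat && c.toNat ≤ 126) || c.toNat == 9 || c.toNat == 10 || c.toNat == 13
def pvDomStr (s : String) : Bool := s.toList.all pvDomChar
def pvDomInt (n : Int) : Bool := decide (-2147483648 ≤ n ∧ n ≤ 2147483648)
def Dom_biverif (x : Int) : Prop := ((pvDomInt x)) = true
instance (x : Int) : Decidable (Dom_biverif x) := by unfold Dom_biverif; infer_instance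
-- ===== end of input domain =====

-- B never builds str(x): it rejects negatives and extracts decimal digits arithmetically with
-- divmod(x, 10), checking each digit is at most 1, instead of A's scan of the string form.

-- ===== PORT A =====
-- while test and i < len(ch): test = ch[i] == "0" or ch[i] == "1"; i += 1
def biverifGo (test : Bool) : List Char → Bool
  | [] => test
  | c :: cs => if test then biverifGo (c == '0' || c == '1') cs else test

def biverif (x : Int) : Bool :=
  let ch := PySem.Int.toChars x
  biverifGo true ch

-- ===== PORT B =====
-- the 'while True' loop; only ever entered with the nonnegative remainder of x (a Nat)
def biverifAltGo (n : Nat) : Bool :=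
  let q := n / 10
  let d := n % 10
  if d > 1 then false
  else if q = 0 then true
  else biverifAltGo q
termination_by n
decreasing_by
  exact Nat.div_lt_self (by omega) (by norm_num)

def biverif_alt (x : Int) : Bool :=
  if x < 0 then false
  else biverifAltGo x.toNat

-- ===== PRECONDITION & SPEC =====
def Spec_biverif (x : Int) (out : Bool) : Prop := out = biverif_alt x
instance (x : Int) (out : Bool) : Decidable (Spec_biverif x out) := by unfold Spec_biverif; infer_instance

-- ===== CLAIM (what is proved, stated in full; the proofs are below) =====
def Claim_equal_biverif : Prop := ∀ (x : Int), Dom_biverif x → Spec_biverif x (biverif x)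

-- ===== LEMMAS AND PROOFS =====

-- accumulator law for Nat.toDigitsCore
theorem toDigitsCore_acc (b : Nat) :
    ∀ (f n : Nat) (l : List Char),
      Nat.toDigitsCore b f n l = Nat.toDigitsCore b f n [] ++ l := by
  intro f
  induction f with
  | zero => intro n l; simp [Nat.toDigitsCore]
  | succ f ih =>
    intro n l
    simp only [Nat.toDigitsCore]
    by_cases h : n / b = 0
    · simp [h]
    · simp only [h]
      rw [ih (n / b) (Nat.digitChar (n % b) :: l), ih (n / b) [Nat.digitChar (n % b)]]
      simp

-- fuel irrelevance for Nat.toDigitsCore at base 10 when fuel exceeds n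
theorem toDigitsCore_fuel :
    ∀ (f1 f2 n : Nat) (l : List Char), n < f1 → n < f2 →
      Nat.toDigitsCore 10 f1 n l = Nat.toDigitsCore 10 f2 n l := by
  intro f1
  induction f1 with
  | zero => intro f2 n l h1 _; omega
  | succ f1 ih =>
    intro f2 n l h1 h2
    cases f2 with
    | zero => omega
    | succ f2 =>
      simp only [Nat.toDigitsCore]
      by_cases h : n / 10 = 0
      · simp [h]
      · simp only [h]
        have hn : 0 < n := by omega
        have hlt : n / 10 < n := Nat.div_lt_self hn (by norm_num)
        exact ih f2 (n / 10) _ (by omega) (by omega)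

-- base case of str(n) for n < 10
theorem toDigits_small (n : Nat) (h : n < 10) :
    Nat.toDigits 10 n = [Nat.digitChar n] := by
  have hq : n / 10 = 0 := Nat.div_eq_of_lt h
  have hm : n % 10 = n := Nat.mod_eq_of_lt h
  simp [Nat.toDigits, Nat.toDigitsCore, hq, hm]

-- recurrence of str(n) for n ≥ 10: last decimal digit peels off
theorem toDigits_step (n : Nat) (h : 10 ≤ n) :
    Nat.toDigits 10 n = Nat.toDigits 10 (n / 10) ++ [Nat.digitChar (n % 10)] := by
  have hq : n / 10 ≠ 0 := by omega
  have hlt : n / 10 < n := Nat.div_lt_self (by omega) (by norm_num)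
  have key : Nat.toDigits 10 n
      = Nat.toDigitsCore 10 n (n / 10) [Nat.digitChar (n % 10)] := by
    simp [Nat.toDigits, Nat.toDigitsCore, hq]
  rw [key, toDigitsCore_acc 10 n (n / 10) [Nat.digitChar (n % 10)],
      toDigitsCore_fuel n (n / 10 + 1) (n / 10) [] hlt (by omega)]
  rfl

theorem biverifGo_false (l : List Char) : biverifGo false l = false := by
  cases l <;> simp [biverifGo]

theorem biverifGo_append (t : Bool) (l1 l2 : List Char) :
    biverifGo t (l1 ++ l2) = biverifGo (biverifGo t l1) l2 := by
  induction l1 generalizing t with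
  | nil => rfl
  | cons c cs ih =>
    by_cases h : t
    · simp [biverifGo, h, ih]
    · simp at h; subst h; simp [biverifGo, biverifGo_false]

-- the crux: scanning the decimal digits of n equals the arithmetic digit loop
theorem go_eq (n : Nat) : biverifGo true (Nat.toDigits 10 n) = biverifAltGo n := by
  induction n using Nat.strong_induction_on with
  | _ n ih =>
    by_cases h : n < 10
    · rw [toDigits_small n h]
      interval_cases n <;> rw [biverifAltGo] <;> decide
    · rw [Nat.not_lt] at h
      rw [toDigits_step n h, biverifGo_append, ih (n / 10) (Nat.div_lt_self (by omega) (by norm_num))]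
      conv_rhs => rw [biverifAltGo]
      have hq : ¬ n / 10 = 0 := by omega
      by_cases hd : n % 10 > 1
      · have h10 : n % 10 < 10 := Nat.mod_lt n (by norm_num)
        have hc : (Nat.digitChar (n % 10) == '0' || Nat.digitChar (n % 10) == '1') = false := by
          interval_cases h : n % 10 <;> decide
        cases hb : biverifAltGo (n / 10) <;>
          simp [biverifGo, hc, hd]
      · have hd01 : n % 10 = 0 ∨ n % 10 = 1 := by omega
        have hc : (Nat.digitChar (n % 10) == '0' || Nat.digitChar (n % 10) == '1') = true := by
          rcases hd01 with h0 | h1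
          · rw [h0]; decide
          · rw [h1]; decide
        cases hb : biverifAltGo (n / 10) <;>
          simp [biverifGo, hc, hd, hq]

-- ===== VERDICT (by name: the statement is the Claim_ definition above) =====
theorem biverif_spec : Claim_equal_biverif := by
  intro x _
  unfold Spec_biverif biverif biverif_alt PySem.Int.toChars
  by_cases hx : x < 0
  · simp [hx, biverifGo, biverifGo_false]
  · simp only [hx, if_false]
    exact go_eq x.toNat
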